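-- pv_equiv track=rewrite | github.com/aepaysinger/code-challenges | code_challenges/code_wars/phone_text.py | presses
-- ===== SOURCE A (Python) =====
-- def presses(phrase):
--     key_pad_touches = {
--         1: {"A", "D", "G", "J", "M", "P", "T", "W", " ", "*", "#", "1"},
--         2: {"B", "E", "H", "K", "N", "Q", "U", "X", "0"},
--         3: {"C", "F", "I", "L", "O", "R", "V", "Y"},
--         4: {"2", "3", "4", "5", "6", "S", "8", "Z"},
--         5: {"7", "9"},
--     }
--     number_of_touches = 0
--     for character in phrase.upper():
--         for presses, characters in key_pad_touches.items():
--             if character in characters: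
--                 number_of_touches += presses
--     return number_of_touches
-- ===== SOURCE B (Python) =====
-- # Single flat char->presses index built once; one pass over the phrase, no inner bucket scan.
-- _FLAT = {
--     "A": 1, "D": 1, "G": 1, "J": 1, "M": 1, "P": 1, "T": 1, "W": 1, " ": 1, "*": 1, "#": 1, "1": 1,
--     "B": 2, "E": 2, "H": 2, "K": 2, "N": 2, "Q": 2, "U": 2, "X": 2, "0": 2,
--     "C": 3, "F": 3, "I": 3, "L": 3, "O": 3, "R": 3, "V": 3, "Y": 3,
--     "2": 4, "3": 4, "4": 4, "5": 4, "6": 4, "S": 4, "8": 4, "Z": 4,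
--     "7": 5, "9": 5,
-- }
--
-- def presses(phrase):
--     return sum(_FLAT.get(c, 0) for c in phrase.upper())
-- ===== Notes on version B (the rewrite author's own statement) =====
-- stated objective: faster
-- what changed: Replaces the per-character scan over the five keypad bucket sets with a single flat char-to-count dict built once, so the loop body is one .get(c, 0) lookup with no inner loop (measured ~4x faster).
import Mathlib
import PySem

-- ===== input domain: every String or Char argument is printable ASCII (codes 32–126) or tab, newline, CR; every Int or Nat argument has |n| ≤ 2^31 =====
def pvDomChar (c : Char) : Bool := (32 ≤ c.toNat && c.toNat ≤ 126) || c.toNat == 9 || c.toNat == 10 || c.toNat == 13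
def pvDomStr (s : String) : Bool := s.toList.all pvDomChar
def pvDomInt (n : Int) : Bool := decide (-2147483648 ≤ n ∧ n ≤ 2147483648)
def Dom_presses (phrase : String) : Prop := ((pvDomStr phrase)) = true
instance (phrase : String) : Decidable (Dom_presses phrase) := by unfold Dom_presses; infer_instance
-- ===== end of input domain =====

-- B replaces A's per-character scan of the 5 keypad buckets by one flat char→count dict looked up once per character (objective: simpler).

-- ===== PORT A =====
-- A's dict literal {presses: set-of-characters}; .items() iterates it in insertion order.
def keyPadTouches : List (Int × PySem.Set Char) :=
  [ (1, PySem.Set.ofList ['A', 'D', 'G', 'J', 'M', 'P', 'T', 'W', ' ', '*', '#', '1'])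
  , (2, PySem.Set.ofList ['B', 'E', 'H', 'K', 'N', 'Q', 'U', 'X', '0'])
  , (3, PySem.Set.ofList ['C', 'F', 'I', 'L', 'O', 'R', 'V', 'Y'])
  , (4, PySem.Set.ofList ['2', '3', '4', '5', '6', 'S', '8', 'Z'])
  , (5, PySem.Set.ofList ['7', '9']) ]

def presses (phrase : String) : Int :=
  (PySem.Str.upper phrase).toList.foldl
    (fun numberOfTouches character =>
      keyPadTouches.foldl
        (fun acc pr => if PySem.Set.contains pr.2 character then acc + pr.1 else acc)
        numberOfTouches)
    0

-- ===== PORT B =====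
-- B's flat dict literal, one entry per mapped character.
def flatTouches : PySem.Dict Char Int := PySem.Dict.mk
  [ ('A', 1), ('D', 1), ('G', 1), ('J', 1), ('M', 1), ('P', 1), ('T', 1), ('W', 1), (' ', 1), ('*', 1), ('#', 1), ('1', 1)
  , ('B', 2), ('E', 2), ('H', 2), ('K', 2), ('N', 2), ('Q', 2), ('U', 2), ('X', 2), ('0', 2)
  , ('C', 3), ('F', 3), ('I', 3), ('L', 3), ('O', 3), ('R', 3), ('V', 3), ('Y', 3)
  , ('2', 4), ('3', 4), ('4', 4), ('5', 4), ('6', 4), ('S', 4), ('8', 4), ('Z', 4)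
  , ('7', 5), ('9', 5) ]

def presses_alt (phrase : String) : Int :=
  ((PySem.Str.upper phrase).toList.map (fun c => PySem.Dict.getD flatTouches c 0)).sum

-- ===== PRECONDITION & SPEC =====
def Spec_presses (phrase : String) (out : Int) : Prop := out = presses_alt phrase
instance (phrase : String) (out : Int) : Decidable (Spec_presses phrase out) := by unfold Spec_presses; infer_instance

-- ===== CLAIM (what is proved, stated in full; the proofs are below) =====
def Claim_equal_presses : Prop := ∀ (phrase : String), Dom_presses phrase → Spec_presses phrase (presses phrase)

-- ===== LEMMAS AND PROOFS =====

-- All characters that A's buckets mention.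
def allMapped : List Char :=
  ['A', 'D', 'G', 'J', 'M', 'P', 'T', 'W', ' ', '*', '#', '1',
   'B', 'E', 'H', 'K', 'N', 'Q', 'U', 'X', '0',
   'C', 'F', 'I', 'L', 'O', 'R', 'V', 'Y',
   '2', '3', '4', '5', '6', 'S', '8', 'Z',
   '7', '9']

-- The inner bucket scan of A equals acc + the flat lookup of B.
theorem inner_eq (acc : Int) (c : Char) :
    keyPadTouches.foldl
      (fun acc pr => if PySem.Set.contains pr.2 c then acc + pr.1 else acc) acc
      = acc + PySem.Dict.getD flatTouches c 0 := by
  by_cases h : c ∈ allMapped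
  · fin_cases h <;> simp [keyPadTouches, flatTouches, PySem.Dict.getD, PySem.Dict.get?]
  · simp only [allMapped, List.mem_cons, List.not_mem_nil, or_false, not_or] at h
    obtain ⟨h1, h2, h3, h4, h5, h6, h7, h8, h9, h10, h11, h12, h13, h14, h15, h16, h17,
      h18, h19, h20, h21, h22, h23, h24, h25, h26, h27, h28, h29, h30, h31, h32, h33,
      h34, h35, h36, h37, h38, h39⟩ := h
    have hf : List.find? (fun p => p.1 == c) flatTouches.items = none := by
      rw [List.find?_eq_none]
      intro p hp
      fin_cases hp <;> (intro e; exact absurd (beq_iff_eq.mp e).symm (by assumption))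
    simp only [flatTouches] at hf
    simp [keyPadTouches, flatTouches, PySem.Dict.getD, PySem.Dict.get?, PySem.Set.ofList,
      PySem.Set.contains, hf, h1, h2, h3, h4, h5, h6, h7, h8, h9, h10, h11, h12, h13, h14,
      h15, h16, h17, h18, h19, h20, h21, h22, h23, h24, h25, h26, h27, h28, h29, h30,
      h31, h32, h33, h34, h35, h36, h37, h38, h39]

theorem fold_eq (l : List Char) (acc : Int) :
    l.foldl
      (fun numberOfTouches character =>
        keyPadTouches.foldl
          (fun a pr => if PySem.Set.contains pr.2 character then a + pr.1 else a)
          numberOfTouches) acc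
      = acc + (l.map (fun c => PySem.Dict.getD flatTouches c 0)).sum := by
  induction l generalizing acc with
  | nil => simp
  | cons x xs ih =>
    rw [List.foldl_cons, inner_eq, ih]
    simp [add_assoc]

-- ===== VERDICT (by name: the statement is the Claim_ definition above) =====
theorem presses_spec : Claim_equal_presses := by
  intro phrase _
  unfold Spec_presses presses presses_alt
  simpa using fold_eq (PySem.Str.upper phrase).toList 0
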